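-- pv_equiv track=rewrite | github.com/hackerliang/IERG4300 | Homework2/src/main/python/APriori.py | freq_pairs
-- ===== SOURCE A (Python) =====
-- from operator import itemgetter
--
-- def freq_pairs(baskets, freq_items, freq_count):
--     """Find the frequent item pairs.
--     @param: the baskets, 2D list
--     @param: frequent individual items with counts, dict.
--     @param: min count for a frequent pair, int.
--     @return: frequent pairs with counts, dict.
--     """
--     # Construct pairs from frequent items.
--     # If a pair is frequent, both of the members are frequent.
--     pairs = {}
--     items = list(freq_items.keys())
--     for i in range(len(items)):
--         for j in range(i + 1, len(items)):
--             pairs[(items[i], items[j])] = 0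
--     # Find and count the pairs in each basket
--     for basket in baskets:
--         for i in range(len(basket)):
--             for j in range(i + 1, len(basket)):
--                 if (basket[i], basket[j]) in pairs:
--                     pairs[(basket[i], basket[j])] += 1
--                 elif (basket[j], basket[i]) in pairs:
--                     pairs[(basket[j], basket[i])] += 1
--                 else:
--                     continue
--     # Remove non-frequent pairs.
--     freq_pairs = {}
--     for pair, count in pairs.items():
--         if count >= freq_count:
--             freq_pairs[pair] = count
--     # Sort the dictionary.
--     freq_pairs = sorted(freq_pairs.items(), key=itemgetter(1))
--     return freq_pairs
-- ===== SOURCE B (Python) =====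
-- def freq_pairs(baskets, freq_items, freq_count):
--     """Pair-centric counting: the support of a pair of distinct items u, v is
--     sum over baskets of count(u) * count(v), since every co-occurrence of u and v
--     at two positions contributes exactly one ordered position pair.  Each
--     candidate pair of frequent items is evaluated directly, kept if its support
--     meets the threshold, and the survivors are stable-sorted by support."""
--     items = list(freq_items)
--     result = []
--     for p in range(len(items)):
--         for q in range(p + 1, len(items)):
--             support = sum(b.count(items[p]) * b.count(items[q]) for b in baskets)
--             if support >= freq_count:
--                 result.append(((items[p], items[q]), support))
--     result.sort(key=lambda pc: pc[1])
--     return result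
-- ===== Notes on version B (the rewrite author's own statement) =====
-- stated objective: alternative
-- what changed: B is pair-centric and dict-free: for each candidate pair of frequent items it computes the support directly as the sum over baskets of count(u)*count(v) (the product-of-multiplicities identity replaces A's enumeration of basket position pairs with membership tests against a pre-initialised all-pairs dict), appends survivors in candidate order and stable-sorts by support.
import Mathlib
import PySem

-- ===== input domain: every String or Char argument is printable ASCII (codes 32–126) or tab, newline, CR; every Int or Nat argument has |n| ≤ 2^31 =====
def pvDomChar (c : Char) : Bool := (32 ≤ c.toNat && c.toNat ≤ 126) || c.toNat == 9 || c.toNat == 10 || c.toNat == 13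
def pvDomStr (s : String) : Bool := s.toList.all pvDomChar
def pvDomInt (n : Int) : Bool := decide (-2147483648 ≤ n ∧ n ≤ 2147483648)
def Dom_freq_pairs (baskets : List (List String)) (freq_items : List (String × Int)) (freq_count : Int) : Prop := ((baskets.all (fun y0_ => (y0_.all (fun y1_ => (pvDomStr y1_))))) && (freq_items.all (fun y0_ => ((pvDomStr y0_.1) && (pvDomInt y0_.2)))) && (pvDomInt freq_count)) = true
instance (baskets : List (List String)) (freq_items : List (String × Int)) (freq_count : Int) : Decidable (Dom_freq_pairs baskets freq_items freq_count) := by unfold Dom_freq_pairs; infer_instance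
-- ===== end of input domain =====

-- B is pair-centric and dict-free: each candidate pair's support is computed directly as
-- sum over baskets of count(u)*count(v); same return value, proved below.

-- ===== PORT A =====
-- pairs = {(items[i], items[j]): 0 for i < j}   (the two init loops)
def pvA_init (items : List String) : PySem.Dict (String × String) Int :=
  (PySem.List.pyRange 0 (PySem.List.len items)).foldl (fun d i =>
    (PySem.List.pyRange (i + 1) (PySem.List.len items)).foldl (fun d j =>
      d.insert (PySem.List.pyGetD items i "", PySem.List.pyGetD items j "") 0) d)
    PySem.Dict.empty

-- the body of the innermost basket loop
def pvA_step (d : PySem.Dict (String × String) Int) (x y : String) :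
    PySem.Dict (String × String) Int :=
  if d.contains (x, y) then d.insert (x, y) (d.getD (x, y) 0 + 1)
  else if d.contains (y, x) then d.insert (y, x) (d.getD (y, x) 0 + 1)
  else d

-- for i in range(len(basket)): for j in range(i+1, len(basket)): ...
def pvA_basket (d : PySem.Dict (String × String) Int) (basket : List String) :
    PySem.Dict (String × String) Int :=
  (PySem.List.pyRange 0 (PySem.List.len basket)).foldl (fun d i =>
    (PySem.List.pyRange (i + 1) (PySem.List.len basket)).foldl (fun d j =>
      pvA_step d (PySem.List.pyGetD basket i "") (PySem.List.pyGetD basket j "")) d) d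

def freq_pairs (baskets : List (List String)) (freq_items : List (String × Int))
    (freq_count : Int) : List ((String × String) × Int) :=
  let items := (PySem.Dict.ofList freq_items).keys
  let pairs := baskets.foldl pvA_basket (pvA_init items)
  let fp := pairs.items.foldl
    (fun d pc => if pc.2 ≥ freq_count then d.insert pc.1 pc.2 else d) PySem.Dict.empty
  PySem.List.sorted fp.items (fun pc => pc.2)

-- ===== PORT B =====
-- support = sum(b.count(items[p]) * b.count(items[q]) for b in baskets)
def pvB_support (baskets : List (List String)) (u v : String) : Int :=
  (baskets.map (fun b => (PySem.List.count b u : Int) * (PySem.List.count b v : Int))).sum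

def freq_pairs_alt (baskets : List (List String)) (freq_items : List (String × Int))
    (freq_count : Int) : List ((String × String) × Int) :=
  let items := (PySem.Dict.ofList freq_items).keys
  let result := (PySem.List.pyRange 0 (PySem.List.len items)).foldl (fun acc p =>
    (PySem.List.pyRange (p + 1) (PySem.List.len items)).foldl (fun acc q =>
      if pvB_support baskets (PySem.List.pyGetD items p "") (PySem.List.pyGetD items q "")
          ≥ freq_count then
        acc ++ [((PySem.List.pyGetD items p "", PySem.List.pyGetD items q ""),
                 pvB_support baskets (PySem.List.pyGetD items p "")
                   (PySem.List.pyGetD items q ""))]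
      else acc) acc) []
  PySem.List.sorted result (fun pc => pc.2)

-- ===== PRECONDITION & SPEC =====
def Spec_freq_pairs (baskets : List (List String)) (freq_items : List (String × Int)) (freq_count : Int) (out : List ((String × String) × Int)) : Prop := out = freq_pairs_alt baskets freq_items freq_count
instance (baskets : List (List String)) (freq_items : List (String × Int)) (freq_count : Int) (out : List ((String × String) × Int)) : Decidable (Spec_freq_pairs baskets freq_items freq_count out) := by unfold Spec_freq_pairs; infer_instance

-- ===== CLAIM (what is proved, stated in full; the proofs are below) =====
def Claim_equal_freq_pairs : Prop := ∀ (baskets : List (List String)) (freq_items : List (String × Int)) (freq_count : Int), Dom_freq_pairs baskets freq_items freq_count → Spec_freq_pairs baskets freq_items freq_count (freq_pairs baskets freq_items freq_count)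

-- ===== LEMMAS AND PROOFS =====

-- ---- proof-side vocabulary ----

-- all index pairs (p, q) with 0 ≤ p < q < n, in the lexicographic order both programs generate
def pvAP (n : Int) : List (Int × Int) :=
  (PySem.List.pyRange 0 n).flatMap (fun p =>
    (PySem.List.pyRange (p + 1) n).map (fun q => (p, q)))

-- indicator: the position pair (x, y) matches the item pair (items[p], items[q])
def pvMatch (items : List String) (p q : Int) (x y : String) : Int :=
  if (x = PySem.List.pyGetD items p "" ∧ y = PySem.List.pyGetD items q "") ∨
     (x = PySem.List.pyGetD items q "" ∧ y = PySem.List.pyGetD items p "") then 1 else 0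

-- the number of basket position pairs matching (items[p], items[q]) — A's count
def pvCnt (items : List String) (baskets : List (List String)) (p q : Int) : Int :=
  (baskets.map (fun b =>
    ((PySem.List.pyRange 0 (PySem.List.len b)).map (fun i =>
      ((PySem.List.pyRange (i + 1) (PySem.List.len b)).map (fun j =>
        pvMatch items p q (PySem.List.pyGetD b i "") (PySem.List.pyGetD b j ""))).sum)).sum)).sum

-- A's candidate keys, in insertion order
def pvK (items : List String) : List (String × String) :=
  (pvAP (PySem.List.len items)).map
    (fun pq => (PySem.List.pyGetD items pq.1 "", PySem.List.pyGetD items pq.2 ""))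

-- structural double sum over all ordered position pairs of a list
def pvPairSum (m : String → String → Int) : List String → Int
  | [] => 0
  | x :: t => (t.map (m x)).sum + pvPairSum m t

-- ---- generic machinery ----

theorem pv_foldl_spec {γ β : Type} (P : γ → Prop) (V : γ → Int) (f : γ → β → γ)
    (l : List β) (g : β → Int)
    (h : ∀ d x, x ∈ l → P d → P (f d x) ∧ V (f d x) = V d + g x) :
    ∀ d, P d → P (l.foldl f d) ∧ V (l.foldl f d) = V d + (l.map g).sum := by
  induction l with
  | nil => intro d hd; simpa using hd
  | cons x t ih =>
    intro d hd
    obtain ⟨hP, hV⟩ := h d x (List.mem_cons_self) hd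
    obtain ⟨hP', hV'⟩ := ih (fun d y hy hd => h d y (List.mem_cons_of_mem _ hy) hd) (f d x) hP
    refine ⟨hP', ?_⟩
    simp only [List.foldl_cons, List.map_cons, List.sum_cons] at *
    omega

theorem pv_flatMap_congr {α β : Type} (l : List α) (f g : α → List β)
    (h : ∀ a ∈ l, f a = g a) : l.flatMap f = l.flatMap g := by
  induction l with
  | nil => rfl
  | cons x t ih =>
    simp only [List.flatMap_cons, h x List.mem_cons_self,
      ih (fun a ha => h a (List.mem_cons_of_mem _ ha))]

theorem pv_filter_flatMap {α β : Type} (l : List α) (g : α → List β) (p : β → Bool) :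
    (l.flatMap g).filter p = l.flatMap (fun a => (g a).filter p) := by
  induction l with
  | nil => rfl
  | cons x t ih => simp only [List.flatMap_cons, List.filter_append, ih]

-- ---- facts about pvAP ----

theorem pv_mem_pvAP {n : Int} {pq : Int × Int} :
    pq ∈ pvAP n ↔ 0 ≤ pq.1 ∧ pq.1 < pq.2 ∧ pq.2 < n := by
  obtain ⟨p, q⟩ := pq
  simp only [pvAP, List.mem_flatMap, List.mem_map, PySem.List.mem_pyRange_one]
  constructor
  · rintro ⟨a, ⟨ha1, ha2⟩, b, ⟨hb1, hb2⟩, heq⟩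
    cases heq; exact ⟨ha1, by omega, hb2⟩
  · rintro ⟨h1, h2, h3⟩
    exact ⟨p, ⟨h1, by omega⟩, q, ⟨by omega, h3⟩, rfl⟩

theorem pv_pvAP_pairwise (n : Int) :
    (pvAP n).Pairwise (fun a b => a.1 < b.1 ∨ (a.1 = b.1 ∧ a.2 < b.2)) := by
  rw [pvAP, List.pairwise_flatMap]
  constructor
  · intro a _
    rw [List.pairwise_map]
    exact (PySem.List.pairwise_lt_pyRange_one _ _).imp (fun h => Or.inr ⟨rfl, h⟩)
  · refine (PySem.List.pairwise_lt_pyRange_one 0 n).imp ?_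
    intro a b hab x hx y hy
    simp only [List.mem_map] at hx hy
    obtain ⟨qa, _, rfl⟩ := hx
    obtain ⟨qb, _, rfl⟩ := hy
    exact Or.inl hab

-- ---- facts about items / pvK ----

theorem pv_getD_int_cast (items : List String) (p : Nat) (hp : p < items.length) :
    PySem.List.pyGetD items (p : Int) "" = items[p] := by
  rw [PySem.List.pyGetD_eq_getElem items "" (by positivity) (by exact_mod_cast hp)]
  simp

theorem pv_mem_pvK {items : List String} (hnd : items.Nodup) {u v : String} :
    (u, v) ∈ pvK items ↔
      u ∈ items ∧ v ∈ items ∧ items.idxOf u < items.idxOf v := by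
  simp only [pvK, List.mem_map, Prod.mk.injEq]
  constructor
  · rintro ⟨⟨p, q⟩, hmem, hu, hv⟩
    obtain ⟨h1, h2, h3⟩ := pv_mem_pvAP.1 hmem
    simp only [PySem.List.len] at h3
    have hq : q.toNat < items.length := by omega
    have hp : p.toNat < items.length := by omega
    have hu' : u = items[p.toNat] := by
      rw [← hu, PySem.List.pyGetD_eq_getElem items "" h1 (by omega)]
    have hv' : v = items[q.toNat] := by
      rw [← hv, PySem.List.pyGetD_eq_getElem items "" (by omega) (by omega)]
    subst hu' hv'
    refine ⟨List.getElem_mem hp, List.getElem_mem hq, ?_⟩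
    rw [List.Nodup.idxOf_getElem hnd _ hp, List.Nodup.idxOf_getElem hnd _ hq]
    omega
  · rintro ⟨hu, hv, hlt⟩
    have hpu : items.idxOf u < items.length := List.idxOf_lt_length_of_mem hu
    have hpv : items.idxOf v < items.length := List.idxOf_lt_length_of_mem hv
    refine ⟨((items.idxOf u : Int), (items.idxOf v : Int)), ?_, ?_, ?_⟩
    · rw [pv_mem_pvAP]
      refine ⟨by positivity, by simp only []; exact_mod_cast hlt, ?_⟩
      simp only [PySem.List.len]
      exact_mod_cast hpv
    · rw [pv_getD_int_cast items _ hpu]; exact List.getElem_idxOf hpu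
    · rw [pv_getD_int_cast items _ hpv]; exact List.getElem_idxOf hpv

theorem pv_pvAP_nodup (n : Int) : (pvAP n).Nodup := by
  refine (pv_pvAP_pairwise n).imp ?_
  rintro a b h rfl
  omega

theorem pv_pvK_nodup {items : List String} (hnd : items.Nodup) : (pvK items).Nodup := by
  refine List.Nodup.map_on ?_ (pv_pvAP_nodup _)
  rintro ⟨p, q⟩ hx ⟨p', q'⟩ hy hf
  obtain ⟨h1, h2, h3⟩ := pv_mem_pvAP.1 hx
  obtain ⟨h4, h5, h6⟩ := pv_mem_pvAP.1 hy
  simp only [PySem.List.len] at h3 h6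
  simp only [Prod.mk.injEq] at hf ⊢
  have e1 : items[p.toNat]'(by omega) = items[p'.toNat]'(by omega) := by
    rw [← pv_getD_int_cast items p.toNat (by omega), ← pv_getD_int_cast items p'.toNat (by omega)]
    simpa [Int.toNat_of_nonneg, h1, h4] using hf.1
  have e2 : items[q.toNat]'(by omega) = items[q'.toNat]'(by omega) := by
    rw [← pv_getD_int_cast items q.toNat (by omega), ← pv_getD_int_cast items q'.toNat (by omega)]
    simpa [Int.toNat_of_nonneg (show (0:Int) ≤ q by omega), Int.toNat_of_nonneg (show (0:Int) ≤ q' by omega)] using hf.2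
  have := (hnd.getElem_inj_iff).1 e1
  have := (hnd.getElem_inj_iff).1 e2
  omega

-- ---- A side: the candidate dict counts exactly pvCnt ----

theorem pv_init_eq (items : List String) :
    pvA_init items = (pvAP (PySem.List.len items)).foldl
      (fun d pq => d.insert (PySem.List.pyGetD items pq.1 "", PySem.List.pyGetD items pq.2 "") 0)
      PySem.Dict.empty := by
  rw [pvA_init, pvAP, List.foldl_flatMap]
  simp only [List.foldl_map]

theorem pv_init_items (items : List String) (hnd : items.Nodup) :
    (pvA_init items).items = (pvK items).map (fun k => (k, (0 : Int))) := by
  rw [pv_init_eq]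
  have := PySem.Dict.items_foldl_insert_fresh (pvAP (PySem.List.len items))
    (fun pq => (PySem.List.pyGetD items pq.1 "", PySem.List.pyGetD items pq.2 ""))
    (fun _ => (0 : Int)) PySem.Dict.empty
    (fun a _ => PySem.Dict.contains_empty _) (pv_pvK_nodup hnd)
  rw [this, pvK, List.map_map]
  rfl

theorem pv_init_keys (items : List String) (hnd : items.Nodup) :
    (pvA_init items).keys = pvK items := by
  show ((pvA_init items).items.map (fun p => p.1)) = pvK items
  rw [pv_init_items items hnd, List.map_map]
  exact List.map_congr_left (fun a _ => rfl) |>.trans (List.map_id _)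

theorem pv_init_getD (items : List String) (hnd : items.Nodup) {k : String × String}
    (hk : k ∈ pvK items) : (pvA_init items).getD k 0 = 0 := by
  refine PySem.Dict.getD_of_mem_items _ ?_ ?_ _
  · rw [pv_init_items items hnd]
    exact List.mem_map_of_mem hk
  · rw [pv_init_keys items hnd]; exact pv_pvK_nodup hnd

theorem pv_A_step_spec (items : List String) (hnd : items.Nodup) {p q : Int}
    (hpq : (p, q) ∈ pvAP (PySem.List.len items)) (d : PySem.Dict (String × String) Int)
    (hP : d.keys = pvK items) (x y : String) :
    (pvA_step d x y).keys = pvK items ∧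
    (pvA_step d x y).getD (PySem.List.pyGetD items p "", PySem.List.pyGetD items q "") 0 =
      d.getD (PySem.List.pyGetD items p "", PySem.List.pyGetD items q "") 0 +
        pvMatch items p q x y := by
  obtain ⟨h1, h2, h3⟩ := pv_mem_pvAP.1 hpq
  simp only [PySem.List.len] at h3
  have hpn : p.toNat < items.length := by omega
  have hqn : q.toNat < items.length := by omega
  have hgp : PySem.List.pyGetD items p "" = items[p.toNat] := by
    rw [← pv_getD_int_cast items p.toNat hpn]; congr 1; omega
  have hgq : PySem.List.pyGetD items q "" = items[q.toNat] := by
    rw [← pv_getD_int_cast items q.toNat hqn]; congr 1; omega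
  have hip : items.idxOf (items[p.toNat]) = p.toNat := List.Nodup.idxOf_getElem hnd _ hpn
  have hiq : items.idxOf (items[q.toNat]) = q.toNat := List.Nodup.idxOf_getElem hnd _ hqn
  have hKt : (PySem.List.pyGetD items p "", PySem.List.pyGetD items q "") ∈ pvK items := by
    rw [pv_mem_pvK hnd, hgp, hgq]
    exact ⟨List.getElem_mem hpn, List.getElem_mem hqn, by rw [hip, hiq]; omega⟩
  have hcont : ∀ z : String × String, d.contains z = decide (z ∈ pvK items) := by
    intro z; rw [PySem.Dict.contains_eq_decide_mem_keys, hP]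
  rw [pvA_step, hcont (x, y), hcont (y, x)]
  by_cases hxy : (x, y) ∈ pvK items
  · have hc : d.contains (x, y) = true := by rw [hcont]; simpa
    simp only [hxy, decide_true, if_true]
    refine ⟨(PySem.Dict.keys_insert_of_contains d _ hc).trans hP, ?_⟩
    rw [PySem.Dict.getD_insert]
    by_cases he : (PySem.List.pyGetD items p "", PySem.List.pyGetD items q "") = (x, y)
    · rw [if_pos he, ← he]
      have : pvMatch items p q x y = 1 := by
        rw [pvMatch, if_pos]
        left
        exact ⟨(Prod.mk.injEq .. ▸ he.symm).1, (Prod.mk.injEq .. ▸ he.symm).2⟩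
      omega
    · rw [if_neg he]
      have : pvMatch items p q x y = 0 := by
        rw [pvMatch, if_neg]
        rintro (⟨rfl, rfl⟩ | ⟨rfl, rfl⟩)
        · exact he rfl
        · obtain ⟨_, _, hlt⟩ := (pv_mem_pvK hnd).1 hxy
          rw [hgp, hgq, hip, hiq] at hlt
          omega
      omega
  · by_cases hyx : (y, x) ∈ pvK items
    · have hc : d.contains (y, x) = true := by rw [hcont]; simpa
      simp only [hxy, hyx, decide_true, decide_false, if_true, Bool.false_eq_true, if_false]
      refine ⟨(PySem.Dict.keys_insert_of_contains d _ hc).trans hP, ?_⟩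
      rw [PySem.Dict.getD_insert]
      by_cases he : (PySem.List.pyGetD items p "", PySem.List.pyGetD items q "") = (y, x)
      · rw [if_pos he, ← he]
        have : pvMatch items p q x y = 1 := by
          rw [pvMatch, if_pos]
          right
          exact ⟨(Prod.mk.injEq .. ▸ he.symm).2, (Prod.mk.injEq .. ▸ he.symm).1⟩
        omega
      · rw [if_neg he]
        have : pvMatch items p q x y = 0 := by
          rw [pvMatch, if_neg]
          rintro (⟨rfl, rfl⟩ | ⟨rfl, rfl⟩)
          · exact hxy hKt
          · exact he rfl
        omega
    · simp only [hxy, hyx, decide_false, Bool.false_eq_true, if_false]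
      refine ⟨hP, ?_⟩
      have : pvMatch items p q x y = 0 := by
        rw [pvMatch, if_neg]
        rintro (⟨rfl, rfl⟩ | ⟨rfl, rfl⟩)
        · exact hxy hKt
        · exact hyx hKt
      omega

theorem pv_A_counts (items : List String) (hnd : items.Nodup)
    (baskets : List (List String)) {p q : Int}
    (hpq : (p, q) ∈ pvAP (PySem.List.len items)) :
    (baskets.foldl pvA_basket (pvA_init items)).keys = pvK items ∧
    (baskets.foldl pvA_basket (pvA_init items)).getD
      (PySem.List.pyGetD items p "", PySem.List.pyGetD items q "") 0 =
      pvCnt items baskets p q := by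
  set kt := (PySem.List.pyGetD items p "", PySem.List.pyGetD items q "") with hkt
  have hbasket : ∀ d b, d.keys = pvK items →
      (pvA_basket d b).keys = pvK items ∧
      (pvA_basket d b).getD kt 0 = d.getD kt 0 +
        ((PySem.List.pyRange 0 (PySem.List.len b)).map (fun i =>
          ((PySem.List.pyRange (i + 1) (PySem.List.len b)).map (fun j =>
            pvMatch items p q (PySem.List.pyGetD b i "") (PySem.List.pyGetD b j ""))).sum)).sum := by
    intro d b hd
    rw [pvA_basket]
    refine pv_foldl_spec (fun d => d.keys = pvK items) (fun d => d.getD kt 0) _ _ _ ?_ d hd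
    intro d' i _ hd'
    refine pv_foldl_spec (fun d => d.keys = pvK items) (fun d => d.getD kt 0) _ _ _ ?_ d' hd'
    intro d'' j _ hd''
    exact pv_A_step_spec items hnd hpq d'' hd'' _ _
  have := pv_foldl_spec (fun d => d.keys = pvK items) (fun d => d.getD kt 0)
    pvA_basket baskets _ (fun d b _ hd => hbasket d b hd) (pvA_init items) (pv_init_keys items hnd)
  refine ⟨this.1, ?_⟩
  simp only [] at this
  rw [this.2, pv_init_getD items hnd ?hK]
  · rw [pvCnt]; ring
  · exact (pv_mem_pvAP.1 hpq) |> fun h => by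
      have h3 := h.2.2
      simp only [PySem.List.len] at h3
      rw [hkt, pv_mem_pvK hnd]
      have hpn : p.toNat < items.length := by omega
      have hqn : q.toNat < items.length := by omega
      have hgp : PySem.List.pyGetD items p "" = items[p.toNat] := by
        rw [← pv_getD_int_cast items p.toNat hpn]; congr 1; omega
      have hgq : PySem.List.pyGetD items q "" = items[q.toNat] := by
        rw [← pv_getD_int_cast items q.toNat hqn]; congr 1; omega
      rw [hgp, hgq, List.Nodup.idxOf_getElem hnd _ hpn, List.Nodup.idxOf_getElem hnd _ hqn]
      exact ⟨List.getElem_mem hpn, List.getElem_mem hqn, by omega⟩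

theorem pv_A_step_keys (d : PySem.Dict (String × String) Int) (x y : String) :
    (pvA_step d x y).keys = d.keys := by
  rw [pvA_step]
  split_ifs with h1 h2
  · exact PySem.Dict.keys_insert_of_contains d _ h1
  · exact PySem.Dict.keys_insert_of_contains d _ h2
  · rfl

theorem pv_A_keys (items : List String) (hnd : items.Nodup) (baskets : List (List String)) :
    (baskets.foldl pvA_basket (pvA_init items)).keys = pvK items := by
  have hbasket : ∀ d b, d.keys = pvK items → (pvA_basket d b).keys = pvK items := by
    intro d b hd
    rw [pvA_basket]
    refine (pv_foldl_spec (fun d => d.keys = pvK items) (fun _ => (0 : Int)) _ _ (fun _ => 0)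
      ?_ d hd).1
    intro d' i _ hd'
    refine ⟨(pv_foldl_spec (fun d => d.keys = pvK items) (fun _ => (0 : Int)) _ _ (fun _ => 0)
      ?_ d' hd').1, by simp⟩
    intro d'' j _ hd''
    exact ⟨(pv_A_step_keys d'' _ _).trans hd'', by simp⟩
  exact (pv_foldl_spec (fun d => d.keys = pvK items) (fun _ => (0 : Int)) _ baskets (fun _ => 0)
    (fun d b _ hd => ⟨hbasket d b hd, by simp⟩) (pvA_init items) (pv_init_keys items hnd)).1

-- ---- the counting identity: position-pair sum = product of multiplicities ----

theorem pv_range_pairSum (m : String → String → Int) (b : List String) :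
    ((List.range b.length).map (fun k =>
      ((b.drop (k + 1)).map (m (b.getD k ""))).sum)).sum = pvPairSum m b := by
  induction b with
  | nil => simp [pvPairSum]
  | cons x t ih =>
    rw [List.length_cons, List.range_succ_eq_map, List.map_cons, List.sum_cons, List.map_map]
    have hcongr : (List.range t.length).map
        ((fun k => (((x :: t).drop (k + 1)).map (m ((x :: t).getD k ""))).sum) ∘ Nat.succ) =
        (List.range t.length).map (fun k => ((t.drop (k + 1)).map (m (t.getD k ""))).sum) := by
      refine List.map_congr_left ?_
      intro k _
      simp [Function.comp]
    rw [hcongr, ih]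
    simp [pvPairSum]

theorem pv_index_pairSum (m : String → String → Int) (b : List String) :
    ((PySem.List.pyRange 0 (PySem.List.len b)).map (fun i =>
      ((PySem.List.pyRange (i + 1) (PySem.List.len b)).map (fun j =>
        m (PySem.List.pyGetD b i "") (PySem.List.pyGetD b j ""))).sum)).sum = pvPairSum m b := by
  have hinner : ∀ i : Int, 0 ≤ i →
      (PySem.List.pyRange (i + 1) (PySem.List.len b)).map (fun j =>
        m (PySem.List.pyGetD b i "") (PySem.List.pyGetD b j "")) =
      (b.drop (i + 1).toNat).map (m (PySem.List.pyGetD b i "")) := by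
    intro i hi
    rw [← PySem.List.map_pyGetD_pyRange b "" (a := i + 1) (by omega), List.map_map]
    rfl
  rw [PySem.List.pyRange_one 0 (PySem.List.len b), List.map_map]
  have hlen : ((PySem.List.len b) - 0).toNat = b.length := by simp [PySem.List.len]
  rw [hlen]
  refine Eq.trans (congrArg List.sum (List.map_congr_left ?_)) (pv_range_pairSum m b)
  intro k hk
  have hk' : k < b.length := List.mem_range.mp hk
  simp only [Function.comp]
  rw [show (0 : Int) + (k : Int) = (k : Int) by omega, hinner (k : Int) (by positivity)]
  rw [show ((k : Int) + 1).toNat = k + 1 by omega, PySem.List.pyGetD_natCast]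

theorem pv_pairSum_count (u v : String) (huv : u ≠ v) (b : List String) :
    pvPairSum (fun x y =>
      if (x = u ∧ y = v) ∨ (x = v ∧ y = u) then 1 else 0) b =
    (List.count u b : Int) * (List.count v b : Int) := by
  induction b with
  | nil => simp [pvPairSum]
  | cons x t ih =>
    show (t.map (fun y => if (x = u ∧ y = v) ∨ (x = v ∧ y = u) then (1:Int) else 0)).sum +
      pvPairSum _ t = _
    rw [ih, List.count_cons, List.count_cons]
    by_cases hxu : x = u
    · have hs : (t.map (fun y =>
          if (x = u ∧ y = v) ∨ (x = v ∧ y = u) then (1:Int) else 0)).sum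
          = (List.count v t : Int) := by
        have hmap : (t.map (fun y =>
            if (x = u ∧ y = v) ∨ (x = v ∧ y = u) then (1:Int) else 0)) =
            (t.map (fun y => if (y == v) = true then (1:Int) else 0)) := by
          refine List.map_congr_left (fun y _ => ?_)
          have hiff : ((x = u ∧ y = v) ∨ (x = v ∧ y = u)) ↔ y = v := by
            constructor
            · rintro (⟨_, h⟩ | ⟨h, _⟩)
              · exact h
              · exact absurd (hxu ▸ h) huv
            · intro h; exact Or.inl ⟨hxu, h⟩
          simp [hiff]
        rw [hmap, PySem.List.sum_map_ite_one_zero]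
        simp [List.count]
      have hxv : ¬ x = v := fun h => huv (hxu ▸ h)
      rw [hs]
      simp only [hxu, beq_self_eq_true, if_true, beq_iff_eq, if_false, huv]
      push_cast
      ring
    · by_cases hxv : x = v
      · have hs : (t.map (fun y =>
            if (x = u ∧ y = v) ∨ (x = v ∧ y = u) then (1:Int) else 0)).sum
            = (List.count u t : Int) := by
          have hmap : (t.map (fun y =>
              if (x = u ∧ y = v) ∨ (x = v ∧ y = u) then (1:Int) else 0)) =
              (t.map (fun y => if (y == u) = true then (1:Int) else 0)) := by
            refine List.map_congr_left (fun y _ => ?_)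
            have hiff : ((x = u ∧ y = v) ∨ (x = v ∧ y = u)) ↔ y = u := by
              constructor
              · rintro (⟨h, _⟩ | ⟨_, h⟩)
                · exact absurd h hxu
                · exact h
              · intro h; exact Or.inr ⟨hxv, h⟩
            simp [hiff]
          rw [hmap, PySem.List.sum_map_ite_one_zero]
          simp [List.count]
        rw [hs]
        simp only [hxv, beq_self_eq_true, if_true, beq_iff_eq, if_false, Ne.symm huv]
        push_cast
        ring
      · have hs : (t.map (fun y =>
            if (x = u ∧ y = v) ∨ (x = v ∧ y = u) then (1:Int) else 0)).sum = 0 := by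
          have hmap : (t.map (fun y =>
              if (x = u ∧ y = v) ∨ (x = v ∧ y = u) then (1:Int) else 0)) =
              t.map (fun _ => (0:Int)) := by
            refine List.map_congr_left (fun y _ => ?_)
            rw [if_neg]
            rintro (⟨h, _⟩ | ⟨h, _⟩)
            · exact hxu h
            · exact hxv h
          rw [hmap]
          simp
        rw [hs]
        simp [hxu, hxv]

theorem pv_cnt_eq_support (items : List String) (hnd : items.Nodup)
    (baskets : List (List String)) {p q : Int}
    (hpq : (p, q) ∈ pvAP (PySem.List.len items)) :
    pvCnt items baskets p q =
      pvB_support baskets (PySem.List.pyGetD items p "") (PySem.List.pyGetD items q "") := by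
  obtain ⟨h1, h2, h3⟩ := pv_mem_pvAP.1 hpq
  simp only [PySem.List.len] at h3
  have hpn : p.toNat < items.length := by omega
  have hqn : q.toNat < items.length := by omega
  have hgp : PySem.List.pyGetD items p "" = items[p.toNat] := by
    rw [← pv_getD_int_cast items p.toNat hpn]; congr 1; omega
  have hgq : PySem.List.pyGetD items q "" = items[q.toNat] := by
    rw [← pv_getD_int_cast items q.toNat hqn]; congr 1; omega
  have huv : PySem.List.pyGetD items p "" ≠ PySem.List.pyGetD items q "" := by
    rw [hgp, hgq]
    intro h
    have := (hnd.getElem_inj_iff).1 h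
    omega
  rw [pvCnt, pvB_support]
  refine congrArg List.sum (List.map_congr_left ?_)
  intro b _
  rw [pv_index_pairSum (pvMatch items p q) b, PySem.List.count_eq, PySem.List.count_eq]
  exact pv_pairSum_count _ _ huv b

-- ---- the shared survivor list ----

theorem pv_core (items : List String) (hnd : items.Nodup)
    (baskets : List (List String)) (freq_count : Int) :
    ((baskets.foldl pvA_basket (pvA_init items)).items.foldl
        (fun d pc => if pc.2 ≥ freq_count then d.insert pc.1 pc.2 else d)
        PySem.Dict.empty).items =
    (PySem.List.pyRange 0 (PySem.List.len items)).foldl (fun acc p =>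
      (PySem.List.pyRange (p + 1) (PySem.List.len items)).foldl (fun acc q =>
        if pvB_support baskets (PySem.List.pyGetD items p "") (PySem.List.pyGetD items q "")
            ≥ freq_count then
          acc ++ [((PySem.List.pyGetD items p "", PySem.List.pyGetD items q ""),
                   pvB_support baskets (PySem.List.pyGetD items p "")
                     (PySem.List.pyGetD items q ""))]
        else acc) acc) [] := by
  set n : Int := PySem.List.len items with hn
  set pairs1 := baskets.foldl pvA_basket (pvA_init items) with hpairs1
  set F : Int × Int → (String × String) × Int := fun pq =>
    ((PySem.List.pyGetD items pq.1 "", PySem.List.pyGetD items pq.2 ""),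
      pvCnt items baskets pq.1 pq.2) with hF
  have hkeys1 : pairs1.keys = pvK items := pv_A_keys items hnd baskets
  have hnd1 : pairs1.keys.Nodup := by rw [hkeys1]; exact pv_pvK_nodup hnd
  -- A's surviving dict, as a filtered list
  have hfp : (pairs1.items.foldl
      (fun d pc => if pc.2 ≥ freq_count then d.insert pc.1 pc.2 else d)
      PySem.Dict.empty).items
      = pairs1.items.filter (fun pc => decide (pc.2 ≥ freq_count)) := by
    rw [PySem.List.foldl_ite_eq_foldl_filter
      (fun pc : (String × String) × Int => pc.2 ≥ freq_count)
      (fun d pc => d.insert pc.1 pc.2) pairs1.items PySem.Dict.empty]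
    have hsub : ((pairs1.items.filter
        (fun pc => decide (pc.2 ≥ freq_count))).map (fun pc => pc.1)).Nodup := by
      have hknd : (pairs1.items.map (fun p => p.1)).Nodup := hnd1
      refine List.Nodup.sublist ?_ hknd
      exact List.Sublist.map _ List.filter_sublist
    have := PySem.Dict.items_foldl_insert_fresh
      (pairs1.items.filter (fun pc => decide (pc.2 ≥ freq_count)))
      (fun pc => pc.1) (fun pc => pc.2) PySem.Dict.empty
      (fun a _ => PySem.Dict.contains_empty _) hsub
    rw [this]
    have : List.map (fun a : (String × String) × Int => (a.1, a.2))
        (pairs1.items.filter (fun pc => decide (pc.2 ≥ freq_count)))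
        = pairs1.items.filter (fun pc => decide (pc.2 ≥ freq_count)) :=
      (List.map_congr_left (fun a _ => rfl)).trans (List.map_id _)
    rw [this]
    rfl
  -- A's pair dict as a map over all index pairs
  have hitems1 : pairs1.items = (pvAP n).map F := by
    rw [PySem.Dict.items_eq_map_keys pairs1 hnd1 0, hkeys1, pvK, List.map_map]
    refine List.map_congr_left ?_
    intro pq hpq
    have := (pv_A_counts items hnd baskets (p := pq.1) (q := pq.2) hpq).2
    simp only [Function.comp, hF]
    rw [hpairs1, this]
  rw [hfp, hitems1, List.filter_map]
  -- B's nested loop, as a flatMap of filtered maps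
  have hinner : ∀ (p : Int) (acc : List ((String × String) × Int)),
      (PySem.List.pyRange (p + 1) n).foldl (fun acc q =>
        if pvB_support baskets (PySem.List.pyGetD items p "") (PySem.List.pyGetD items q "")
            ≥ freq_count then
          acc ++ [((PySem.List.pyGetD items p "", PySem.List.pyGetD items q ""),
                   pvB_support baskets (PySem.List.pyGetD items p "")
                     (PySem.List.pyGetD items q ""))]
        else acc) acc =
      acc ++ ((PySem.List.pyRange (p + 1) n).filter (fun q =>
          decide (pvB_support baskets (PySem.List.pyGetD items p "")
            (PySem.List.pyGetD items q "") ≥ freq_count))).map (fun q =>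
          ((PySem.List.pyGetD items p "", PySem.List.pyGetD items q ""),
           pvB_support baskets (PySem.List.pyGetD items p "") (PySem.List.pyGetD items q ""))) := by
    intro p acc
    rw [PySem.List.foldl_ite_eq_foldl_filter
      (fun q => pvB_support baskets (PySem.List.pyGetD items p "")
        (PySem.List.pyGetD items q "") ≥ freq_count)
      (fun acc q => acc ++ [((PySem.List.pyGetD items p "", PySem.List.pyGetD items q ""),
        pvB_support baskets (PySem.List.pyGetD items p "") (PySem.List.pyGetD items q ""))])]
    exact PySem.List.foldl_append_singleton_eq_map _ _ _
  have houter : (PySem.List.pyRange 0 n).foldl (fun acc p =>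
      (PySem.List.pyRange (p + 1) n).foldl (fun acc q =>
        if pvB_support baskets (PySem.List.pyGetD items p "") (PySem.List.pyGetD items q "")
            ≥ freq_count then
          acc ++ [((PySem.List.pyGetD items p "", PySem.List.pyGetD items q ""),
                   pvB_support baskets (PySem.List.pyGetD items p "")
                     (PySem.List.pyGetD items q ""))]
        else acc) acc) [] =
      (PySem.List.pyRange 0 n).flatMap (fun p =>
        ((PySem.List.pyRange (p + 1) n).filter (fun q =>
          decide (pvB_support baskets (PySem.List.pyGetD items p "")
            (PySem.List.pyGetD items q "") ≥ freq_count))).map (fun q =>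
          ((PySem.List.pyGetD items p "", PySem.List.pyGetD items q ""),
           pvB_support baskets (PySem.List.pyGetD items p "")
             (PySem.List.pyGetD items q "")))) := by
    have : (fun (acc : List ((String × String) × Int)) p =>
        (PySem.List.pyRange (p + 1) n).foldl (fun acc q =>
          if pvB_support baskets (PySem.List.pyGetD items p "") (PySem.List.pyGetD items q "")
              ≥ freq_count then
            acc ++ [((PySem.List.pyGetD items p "", PySem.List.pyGetD items q ""),
                     pvB_support baskets (PySem.List.pyGetD items p "")
                       (PySem.List.pyGetD items q ""))]
          else acc) acc) =
        (fun acc p => acc ++ ((PySem.List.pyRange (p + 1) n).filter (fun q =>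
          decide (pvB_support baskets (PySem.List.pyGetD items p "")
            (PySem.List.pyGetD items q "") ≥ freq_count))).map (fun q =>
          ((PySem.List.pyGetD items p "", PySem.List.pyGetD items q ""),
           pvB_support baskets (PySem.List.pyGetD items p "")
             (PySem.List.pyGetD items q "")))) := by
      funext acc p
      exact hinner p acc
    rw [this, PySem.List.foldl_append_eq_flatMap]
    rfl
  rw [houter]
  -- A's filtered map of pvAP, pushed through the flatMap
  rw [pvAP, pv_filter_flatMap, List.map_flatMap]
  refine pv_flatMap_congr _ _ _ ?_
  intro p hp
  have hp' := PySem.List.mem_pyRange_one.1 hp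
  rw [List.filter_map, List.map_map]
  have hfilter : (PySem.List.pyRange (p + 1) n).filter
      (((fun pc : (String × String) × Int => decide (pc.2 ≥ freq_count)) ∘ F) ∘ (fun q => (p, q))) =
      (PySem.List.pyRange (p + 1) n).filter (fun q =>
        decide (pvB_support baskets (PySem.List.pyGetD items p "")
          (PySem.List.pyGetD items q "") ≥ freq_count)) := by
    refine List.filter_congr ?_
    intro q hq
    have hq' := PySem.List.mem_pyRange_one.1 hq
    have hmem : ((p, q) : Int × Int) ∈ pvAP n := pv_mem_pvAP.2 ⟨hp'.1, by omega, hq'.2⟩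
    simp only [Function.comp, hF]
    simp only [pv_cnt_eq_support items hnd baskets hmem]
  rw [hfilter]
  refine List.map_congr_left ?_
  intro q hq
  have hq' := PySem.List.mem_pyRange_one.1 (List.mem_of_mem_filter hq)
  have hmem : ((p, q) : Int × Int) ∈ pvAP n := pv_mem_pvAP.2 ⟨hp'.1, by omega, hq'.2⟩
  simp only [Function.comp, hF]
  rw [pv_cnt_eq_support items hnd baskets hmem]

-- ===== VERDICT (by name: the statement is the Claim_ definition above) =====
theorem freq_pairs_spec : Claim_equal_freq_pairs := by
  intro baskets freq_items freq_count _
  unfold Spec_freq_pairs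
  simp only [freq_pairs, freq_pairs_alt]
  exact congrArg (fun l => PySem.List.sorted l (fun pc : (String × String) × Int => pc.2))
    (pv_core ((PySem.Dict.ofList freq_items).keys)
      (PySem.Dict.nodup_keys_ofList freq_items) baskets freq_count)
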